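-- pv_equiv track=rewrite | github.com/tanzeelsaleem/Projects-Assignments | Natural Language Processing/Information Retrieval Systen - Project/app.py | buildrawtermfrequencies
-- ===== SOURCE A (Python) =====
-- def buildrawtermfrequencies(rawtermfrequencies, docfilenames):
--     rtfreq = {}
--     for docid in docfilenames.keys():
--         rtfreq[docid] = {}
--
--     for termindex, docfreqs in rawtermfrequencies.items():
--         for docid, freq in docfreqs.items():
--             if docid in docfilenames.keys():
--                 rtfreq[docid][termindex] = rawtermfrequencies[termindex][docid]
--     return rtfreq
-- ===== SOURCE B (Python) =====
-- def buildrawtermfrequencies(rawtermfrequencies, docfilenames):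
--     # Inverted traversal: outer loop over documents, inner comprehension over terms.
--     return {
--         docid: {termindex: docfreqs[docid]
--                 for termindex, docfreqs in rawtermfrequencies.items()
--                 if docid in docfreqs}
--         for docid in docfilenames
--     }
-- ===== Notes on version B (the rewrite author's own statement) =====
-- stated objective: simpler
-- what changed: Inverts the loop nesting: instead of seeding per-doc dicts and then scanning every term's doc-frequency entries while membership-testing against docfilenames, B iterates documents in the outer loop and builds each doc's inner dict in one comprehension over the terms, membership-testing the doc against each term's frequency dict.
import Mathlib
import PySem

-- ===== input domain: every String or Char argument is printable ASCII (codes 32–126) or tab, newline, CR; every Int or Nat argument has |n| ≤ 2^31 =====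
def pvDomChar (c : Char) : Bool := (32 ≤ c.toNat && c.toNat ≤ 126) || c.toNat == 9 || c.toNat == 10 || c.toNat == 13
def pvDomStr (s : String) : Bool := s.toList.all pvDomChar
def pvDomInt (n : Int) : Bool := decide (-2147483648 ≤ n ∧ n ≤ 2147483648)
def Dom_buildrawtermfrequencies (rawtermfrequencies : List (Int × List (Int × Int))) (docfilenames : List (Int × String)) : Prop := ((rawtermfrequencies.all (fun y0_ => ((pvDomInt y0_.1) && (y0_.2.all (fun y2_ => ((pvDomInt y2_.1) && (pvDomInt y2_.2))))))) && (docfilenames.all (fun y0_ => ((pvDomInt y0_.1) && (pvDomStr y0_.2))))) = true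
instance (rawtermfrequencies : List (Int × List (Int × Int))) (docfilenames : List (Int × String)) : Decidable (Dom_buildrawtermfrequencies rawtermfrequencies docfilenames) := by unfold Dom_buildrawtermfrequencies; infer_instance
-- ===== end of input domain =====

-- B inverts A's loop nesting: documents become the outer loop and each document's inner dict
-- is built by one comprehension over the terms (alternative decomposition, not claimed faster).

-- ===== PORT A =====
-- A-side helpers: the two dict arguments as PySem.Dicts (duplicate keys in the
-- association lists overwrite, first position kept — exact Python dict semantics).
def pvRawD (rawtermfrequencies : List (Int × List (Int × Int))) : PySem.Dict Int (PySem.Dict Int Int) :=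
  PySem.Dict.ofList (rawtermfrequencies.map (fun p => (p.1, PySem.Dict.ofList p.2)))

def pvDfnD (docfilenames : List (Int × String)) : PySem.Dict Int String :=
  PySem.Dict.ofList docfilenames

-- body of A's inner loop: 'for docid, freq in docfreqs.items(): if docid in docfilenames.keys(): rtfreq[docid][termindex] = rawtermfrequencies[termindex][docid]'
-- (rtfreq[docid] and rawtermfrequencies[termindex][docid] are ported with getD;
--  this is exact because both keys are present whenever the branch is taken)
def pvInnerA (dfnD : PySem.Dict Int String) (rawD : PySem.Dict Int (PySem.Dict Int Int))
    (termindex : Int) (r : PySem.Dict Int (PySem.Dict Int Int)) (q : Int × Int) :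
    PySem.Dict Int (PySem.Dict Int Int) :=
  if dfnD.contains q.1 then
    r.modify q.1 PySem.Dict.empty
      (fun inner => inner.insert termindex ((rawD.getD termindex PySem.Dict.empty).getD q.1 0))
  else r

-- body of A's outer loop: 'for termindex, docfreqs in rawtermfrequencies.items(): …'
def pvStepA (dfnD : PySem.Dict Int String) (rawD : PySem.Dict Int (PySem.Dict Int Int))
    (r : PySem.Dict Int (PySem.Dict Int Int)) (p : Int × PySem.Dict Int Int) :
    PySem.Dict Int (PySem.Dict Int Int) :=
  p.2.items.foldl (pvInnerA dfnD rawD p.1) r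

def buildrawtermfrequencies (rawtermfrequencies : List (Int × List (Int × Int))) (docfilenames : List (Int × String)) : List (Int × List (Int × Int)) :=
  let rawD := pvRawD rawtermfrequencies
  let dfnD := pvDfnD docfilenames
  -- rtfreq = {}; for docid in docfilenames.keys(): rtfreq[docid] = {}
  let rtfreq0 : PySem.Dict Int (PySem.Dict Int Int) :=
    dfnD.keys.foldl (fun r docid => r.insert docid PySem.Dict.empty) PySem.Dict.empty
  -- the two nested 'for' loops
  let rtfreq := rawD.items.foldl (pvStepA dfnD rawD) rtfreq0
  rtfreq.items.map (fun p => (p.1, p.2.items))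

-- ===== PORT B =====
-- B: {docid: {t: dfs[docid] for t, dfs in rawtermfrequencies.items() if docid in dfs}
--     for docid in docfilenames}
-- Both comprehensions insert pairwise-distinct fresh keys in iteration order, so the
-- outer one IS a map over the (distinct) doc keys and the inner one IS a filterMap
-- over the term items ('docid in dfs' followed by 'dfs[docid]' is get? returning some).
def buildrawtermfrequencies_alt (rawtermfrequencies : List (Int × List (Int × Int))) (docfilenames : List (Int × String)) : List (Int × List (Int × Int)) :=
  let rawD := pvRawD rawtermfrequencies
  (pvDfnD docfilenames).keys.map (fun docid =>
    (docid, rawD.items.filterMap (fun p => (p.2.get? docid).map (fun v => (p.1, v)))))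

-- ===== PRECONDITION & SPEC =====
def Spec_buildrawtermfrequencies (rawtermfrequencies : List (Int × List (Int × Int))) (docfilenames : List (Int × String)) (out : List (Int × List (Int × Int))) : Prop := out = buildrawtermfrequencies_alt rawtermfrequencies docfilenames
instance (rawtermfrequencies : List (Int × List (Int × Int))) (docfilenames : List (Int × String)) (out : List (Int × List (Int × Int))) : Decidable (Spec_buildrawtermfrequencies rawtermfrequencies docfilenames out) := by unfold Spec_buildrawtermfrequencies; infer_instance

-- ===== CLAIM (what is proved, stated in full; the proofs are below) =====
def Claim_equal_buildrawtermfrequencies : Prop := ∀ (rawtermfrequencies : List (Int × List (Int × Int))) (docfilenames : List (Int × String)), Dom_buildrawtermfrequencies rawtermfrequencies docfilenames → Spec_buildrawtermfrequencies rawtermfrequencies docfilenames (buildrawtermfrequencies rawtermfrequencies docfilenames)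

-- ===== LEMMAS AND PROOFS =====

-- the value B stores for (termindex, docid); A stores rawtermfrequencies[termindex][docid]
-- values of pvRawD are values of the mapped list
theorem pv_mem_values_foldl_insert {ps : List (Int × PySem.Dict Int Int)}
    {d : PySem.Dict Int (PySem.Dict Int Int)} {w : PySem.Dict Int Int}
    (h : w ∈ (ps.foldl (fun acc p => acc.insert p.1 p.2) d).values) :
    w ∈ d.values ∨ w ∈ ps.map Prod.snd := by
  induction ps generalizing d with
  | nil => exact Or.inl h
  | cons p ps ih =>
    rcases ih (d := d.insert p.1 p.2) h with h' | h'
    · rcases PySem.Dict.mem_values_insert d p.1 p.2 w h' with h'' | h''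
      · exact Or.inr (by simp [h''])
      · exact Or.inl h''
    · exact Or.inr (by simp [h'] )

theorem pv_rawD_values_nodup (rawtermfrequencies : List (Int × List (Int × Int)))
    {dfs : PySem.Dict Int Int} (h : dfs ∈ (pvRawD rawtermfrequencies).values) :
    dfs.keys.Nodup := by
  unfold pvRawD PySem.Dict.ofList PySem.Dict.update at h
  rcases pv_mem_values_foldl_insert h with h' | h'
  · simp [PySem.Dict.values, PySem.Dict.empty] at h'
  · simp only [List.map_map, List.mem_map] at h'
    obtain ⟨p, _, hp⟩ := h'
    subst hp
    exact PySem.Dict.nodup_keys_ofList _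

-- inner loop does not touch docid's slot if docid is not among the scanned keys
theorem pv_innerA_no_touch (dfnD : PySem.Dict Int String) (rawD : PySem.Dict Int (PySem.Dict Int Int))
    (t docid : Int) (l : List (Int × Int)) (r : PySem.Dict Int (PySem.Dict Int Int))
    (h : docid ∉ l.map Prod.fst) :
    (l.foldl (pvInnerA dfnD rawD t) r).getD docid PySem.Dict.empty
      = r.getD docid PySem.Dict.empty := by
  induction l generalizing r with
  | nil => rfl
  | cons q l ih =>
    simp only [List.map_cons, List.mem_cons, not_or] at h
    rw [List.foldl_cons, ih _ h.2]
    unfold pvInnerA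
    split
    · exact PySem.Dict.getD_modify_of_ne r _ _ h.1
    · rfl

-- effect of the inner loop, scanning dfs.items, on docid's slot
theorem pv_innerA_effect (dfnD : PySem.Dict Int String) (rawD : PySem.Dict Int (PySem.Dict Int Int))
    (t docid : Int) (hd : dfnD.contains docid = true) :
    ∀ (l : List (Int × Int)) (r : PySem.Dict Int (PySem.Dict Int Int)),
      (l.map Prod.fst).Nodup →
      (l.foldl (pvInnerA dfnD rawD t) r).getD docid PySem.Dict.empty
        = match (PySem.Dict.mk l).get? docid with
          | some _ => (r.getD docid PySem.Dict.empty).insert t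
              ((rawD.getD t PySem.Dict.empty).getD docid 0)
          | none => r.getD docid PySem.Dict.empty := by
  intro l
  induction l with
  | nil => intro r _; rfl
  | cons q l ih =>
    intro r hnd
    simp only [List.map_cons, List.nodup_cons] at hnd
    by_cases hq : q.1 = docid
    · rw [List.foldl_cons, pv_innerA_no_touch dfnD rawD t docid l _ (hq ▸ hnd.1)]
      have : (PySem.Dict.mk (q :: l)).get? docid = some q.2 := by
        rw [show (q : Int × Int) = (q.1, q.2) from rfl, PySem.Dict.get?_mk_cons]
        simp [hq]
      rw [this]
      unfold pvInnerA
      rw [if_pos (by rwa [hq])]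
      exact hq ▸ PySem.Dict.getD_modify_self r q.1 _ _
    · rw [List.foldl_cons, ih _ hnd.2]
      have h1 : (PySem.Dict.mk (q :: l)).get? docid = (PySem.Dict.mk l).get? docid := by
        rw [show (q : Int × Int) = (q.1, q.2) from rfl, PySem.Dict.get?_mk_cons]
        simp [hq]
      rw [h1]
      have h2 : (pvInnerA dfnD rawD t r q).getD docid PySem.Dict.empty
          = r.getD docid PySem.Dict.empty := by
        unfold pvInnerA
        split
        · exact PySem.Dict.getD_modify_of_ne r _ _ (fun h => hq h.symm)
        · rfl
      rw [h2]

-- effect of the outer loop on docid's slot: it appends exactly B's filterMap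
theorem pv_stepA_effect (dfnD : PySem.Dict Int String) (rawD : PySem.Dict Int (PySem.Dict Int Int))
    (docid : Int) (hd : dfnD.contains docid = true) (hraw : rawD.keys.Nodup)
    (hvals : ∀ dfs ∈ rawD.values, PySem.Dict.keys dfs |>.Nodup) :
    ∀ (ts : List (Int × PySem.Dict Int Int)) (r : PySem.Dict Int (PySem.Dict Int Int)),
      (∀ p ∈ ts, p ∈ rawD.items) → (ts.map Prod.fst).Nodup →
      (∀ p ∈ ts, (r.getD docid PySem.Dict.empty).contains p.1 = false) →
      ((ts.foldl (pvStepA dfnD rawD) r).getD docid PySem.Dict.empty).items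
        = (r.getD docid PySem.Dict.empty).items
            ++ ts.filterMap (fun p => (p.2.get? docid).map (fun v => (p.1, v))) := by
  intro ts
  induction ts with
  | nil => intro r _ _ _; simp
  | cons p ts ih =>
    intro r hmem hnd hfresh
    simp only [List.map_cons, List.nodup_cons] at hnd
    have hpmem : p ∈ rawD.items := hmem p (List.mem_cons_self)
    have hpnd : (p.2.items.map Prod.fst).Nodup := by
      have : p.2 ∈ rawD.values := by
        simp only [PySem.Dict.values, List.mem_map]; exact ⟨p, hpmem, rfl⟩
      exact hvals p.2 this
    have heff := pv_innerA_effect dfnD rawD p.1 docid hd p.2.items r hpnd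
    have hmk : PySem.Dict.mk p.2.items = p.2 := rfl
    rw [hmk] at heff
    have hval : rawD.getD p.1 PySem.Dict.empty = p.2 := by
      have : (p.1, p.2) ∈ rawD.items := hpmem
      exact PySem.Dict.getD_of_mem_items rawD this hraw _
    rw [List.foldl_cons]
    cases hget : p.2.get? docid with
    | none =>
      have hslot : (pvStepA dfnD rawD r p).getD docid PySem.Dict.empty
          = r.getD docid PySem.Dict.empty := by
        unfold pvStepA; rw [heff, hget]
      rw [ih _ (fun q hq => hmem q (List.mem_cons_of_mem _ hq)) hnd.2
          (fun q hq => by rw [hslot]; exact hfresh q (List.mem_cons_of_mem _ hq)),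
        hslot]
      simp [hget]
    | some v =>
      have hslot : (pvStepA dfnD rawD r p).getD docid PySem.Dict.empty
          = (r.getD docid PySem.Dict.empty).insert p.1 v := by
        unfold pvStepA; rw [heff, hget, hval, PySem.Dict.getD_of_get?_eq_some _ _ hget]
      have hfresh' : ∀ q ∈ ts, ((pvStepA dfnD rawD r p).getD docid PySem.Dict.empty).contains q.1 = false := by
        intro q hq
        rw [hslot, PySem.Dict.contains_insert]
        have h1 : (q.1 == p.1) = false := by
          have : q.1 ≠ p.1 := by
            intro h; exact hnd.1 (h ▸ (List.mem_map.mpr ⟨q, hq, rfl⟩))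
          simpa using this
        rw [h1, hfresh q (List.mem_cons_of_mem _ hq)]
        rfl
      rw [ih _ (fun q hq => hmem q (List.mem_cons_of_mem _ hq)) hnd.2 hfresh', hslot,
        PySem.Dict.items_insert_of_not_contains _ _ (hfresh p List.mem_cons_self)]
      simp [hget]

-- the keys of rtfreq stay exactly dfnD.keys through the loops
theorem pv_innerA_keys (dfnD : PySem.Dict Int String) (rawD : PySem.Dict Int (PySem.Dict Int Int))
    (t : Int) (l : List (Int × Int)) (r : PySem.Dict Int (PySem.Dict Int Int))
    (h : r.keys = dfnD.keys) :
    (l.foldl (pvInnerA dfnD rawD t) r).keys = dfnD.keys := by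
  induction l generalizing r with
  | nil => exact h
  | cons q l ih =>
    rw [List.foldl_cons]
    apply ih
    unfold pvInnerA
    split
    · rename_i hc
      rw [PySem.Dict.keys_modify, PySem.Dict.keys_insert_of_contains, h]
      rw [show PySem.Dict.contains r q.1 = true from ?_]
      rw [PySem.Dict.contains_iff_mem_keys, h, ← PySem.Dict.contains_iff_mem_keys]
      exact hc
    · exact h

theorem pv_stepA_keys (dfnD : PySem.Dict Int String) (rawD : PySem.Dict Int (PySem.Dict Int Int))
    (ts : List (Int × PySem.Dict Int Int)) (r : PySem.Dict Int (PySem.Dict Int Int))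
    (h : r.keys = dfnD.keys) :
    (ts.foldl (pvStepA dfnD rawD) r).keys = dfnD.keys := by
  induction ts generalizing r with
  | nil => exact h
  | cons p ts ih =>
    rw [List.foldl_cons]
    exact ih _ (pv_innerA_keys dfnD rawD p.1 p.2.items r h)

-- the seeding loop: every slot is the empty dict, keys are dfnD.keys
theorem pv_seed_getD (k : Int) (ks : List Int) (r : PySem.Dict Int (PySem.Dict Int Int))
    (h : r.getD k PySem.Dict.empty = PySem.Dict.empty) :
    (ks.foldl (fun r docid => r.insert docid PySem.Dict.empty) r).getD k PySem.Dict.empty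
      = PySem.Dict.empty := by
  induction ks generalizing r with
  | nil => exact h
  | cons d ks ih =>
    rw [List.foldl_cons]
    apply ih
    rw [PySem.Dict.getD_insert]
    split <;> simp [h]

theorem pv_seed_keys (ks : List Int) (h : ks.Nodup) :
    (ks.foldl (fun r docid => r.insert docid (PySem.Dict.empty : PySem.Dict Int Int)) PySem.Dict.empty).keys = ks := by
  rw [show (fun (r : PySem.Dict Int (PySem.Dict Int Int)) (docid : Int) => r.insert docid PySem.Dict.empty)
       = (fun r docid => r.insert docid ((fun _ _ => PySem.Dict.empty) r docid)) from rfl,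
    PySem.Dict.keys_foldl_insert]
  rw [show (PySem.Dict.empty : PySem.Dict Int (PySem.Dict Int Int)).keys = [] from rfl,
    PySem.Set.update_eq_append_of_disjoint [] ks h (by simp)]
  simp

-- ===== VERDICT (by name: the statement is the Claim_ definition above) =====
theorem buildrawtermfrequencies_spec : Claim_equal_buildrawtermfrequencies := by
  intro raw dfn _
  unfold Spec_buildrawtermfrequencies buildrawtermfrequencies buildrawtermfrequencies_alt
  dsimp only
  set rawD := pvRawD raw with hrawD
  set dfnD := pvDfnD dfn with hdfnD
  have hrawnd : rawD.keys.Nodup := PySem.Dict.nodup_keys_ofList _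
  have hdfnnd : dfnD.keys.Nodup := PySem.Dict.nodup_keys_ofList _
  set r0 : PySem.Dict Int (PySem.Dict Int Int) :=
    dfnD.keys.foldl (fun r docid => r.insert docid PySem.Dict.empty) PySem.Dict.empty with hr0
  set R := rawD.items.foldl (pvStepA dfnD rawD) r0 with hR
  have hr0keys : r0.keys = dfnD.keys := pv_seed_keys dfnD.keys hdfnnd
  have hRkeys : R.keys = dfnD.keys := pv_stepA_keys dfnD rawD rawD.items r0 hr0keys
  have hRnd : R.keys.Nodup := hRkeys ▸ hdfnnd
  rw [PySem.Dict.items_eq_map_keys R hRnd PySem.Dict.empty, hRkeys, List.map_map]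
  apply List.map_congr_left
  intro docid hdocid
  have hd : dfnD.contains docid = true := (PySem.Dict.contains_iff_mem_keys dfnD docid).mpr hdocid
  have hslot0 : r0.getD docid PySem.Dict.empty = PySem.Dict.empty :=
    pv_seed_getD docid dfnD.keys PySem.Dict.empty (PySem.Dict.getD_empty _ _)
  have := pv_stepA_effect dfnD rawD docid hd hrawnd
    (fun dfs hdfs => pv_rawD_values_nodup raw hdfs)
    rawD.items r0 (fun p hp => hp) (by exact hrawnd)
    (fun p hp => by rw [hslot0]; exact PySem.Dict.contains_empty _)
  simp only [Function.comp]
  rw [this, hslot0]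
  rfl
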